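-- pv_equiv track=rewrite | github.com/cafrii/omega2 | 백준/Gold/1744. 수 묶기/수 묶기.py | solve_optimum
-- ===== SOURCE A (Python) =====
-- def solve_optimum(A:list[int])->int:
--     '''
--     네 자연수 a,b,c,d 에 대해서 1 < a < b < c < d 일때
--     ab+cd 가 항상 ac+bd, ad+bc 보다 크다는 것을 증명할 수 있다.
--
--     음수, 양수 구분하고
--     양수 중에서 1보다 큰 수 들에 대해서는 항상 묶어야 한다.
--     묶을 때에는 가장 큰 수 부터 묶어야 한다.
--
--     음수는 반드시 음수끼리 묶어서 양수로 만들어야 한다.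
--     이때에도 절대값이 큰 수끼리 먼저 묶는다.
--
--     홀수개 라서 묶이지 않은 자투리는 그냥 남긴다.
--
--     묶을 수 있는 모든 묶음 수를 제외하면, 나머지는 다음과 같다.
--     음수 자투리, 0, 1, 양수 자투리
--
--     // 나머지들은 몇 개 안될테니 그냥 greedy 로 푸는 게 좋겠다.
--     자투리로만 12개가 넘으면 timeout 된다!
--     (숫자가 중복되지 않는다 라는 조건이 없으니..)
--
--     숫자 0: 마이너스 자투리가 있다면 묶어서 없애야 함. 그렇지 않다면 그냥 더하기.
--     숫자 1: 곱하기 보다는 더하기가 유리. 항상.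
--
--     '''
--
--     negatives,positives,zeros,ones = [],[],[],[]
--     for a in A:
--         if a <= -1:
--             negatives.append(a)
--         elif a == 0:
--             zeros.append(a)
--         elif a == 1:
--             ones.append(a)
--         else:
--             positives.append(a)
--
--     pairs = []
--
--     negatives.sort(reverse=True)
--     while len(negatives) >=2 :
--         pairs.append(negatives[-1]*negatives[-2])
--         del negatives[-2:]
--
--     positives.sort()
--     while len(positives) >=2 :
--         pairs.append(positives[-1]*positives[-2])
--         del positives[-2:]
--
--     assert len(positives) <= 1 and len(negatives) <= 1
--
--     if zeros and negatives:
--         # 0 하나와 음수 자투리 묶어서 없애기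
--         del negatives[-1]
--         del zeros[-1]
--
--     # zero 들은 모두 그냥 버리면 됨.
--     if ones:
--         pairs.append(sum(ones))
--
--     # log("pos: %s, neg: %s, pairs: %s", positives, negatives, pairs)
--     return sum(positives) + sum(negatives) + sum(pairs)
-- ===== SOURCE B (Python) =====
-- def solve_optimum(A: list[int]) -> int:
--     # One sorted copy + two pointers instead of four buckets and two destructive loops.
--     s = sorted(A)
--     n = len(s)
--     total = 0
--     i = 0
--     # pair up the non-positive prefix, most negative first (a zero absorbs an odd negative)
--     while i + 1 < n and s[i + 1] <= 0:
--         total += s[i] * s[i + 1]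
--         i += 2
--     if i < n and s[i] <= 0:
--         total += s[i]
--         i += 1
--     # pair up the >1 suffix, largest first
--     j = n - 1
--     while j - 1 >= i and s[j - 1] > 1:
--         total += s[j] * s[j - 1]
--         j -= 2
--     if j >= i and s[j] > 1:
--         total += s[j]
--         j -= 1
--     # everything left between the pointers is exactly the ones
--     return total + (j - i + 1 if j >= i else 0)
-- ===== Notes on version B (the rewrite author's own statement) =====
-- stated objective: simpler
-- what changed: B replaces A's four bucket lists, two sorts and two destructive pair-from-the-end while loops (plus the zero/negative absorb step) by a single sorted copy scanned with a left pointer pairing the non-positive prefix and a right pointer pairing the >1 suffix; a zero pairing with a leftover negative multiplies to 0, which reproduces A's absorb rule, and the untouched middle (all ones) is added by count.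
import Mathlib
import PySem

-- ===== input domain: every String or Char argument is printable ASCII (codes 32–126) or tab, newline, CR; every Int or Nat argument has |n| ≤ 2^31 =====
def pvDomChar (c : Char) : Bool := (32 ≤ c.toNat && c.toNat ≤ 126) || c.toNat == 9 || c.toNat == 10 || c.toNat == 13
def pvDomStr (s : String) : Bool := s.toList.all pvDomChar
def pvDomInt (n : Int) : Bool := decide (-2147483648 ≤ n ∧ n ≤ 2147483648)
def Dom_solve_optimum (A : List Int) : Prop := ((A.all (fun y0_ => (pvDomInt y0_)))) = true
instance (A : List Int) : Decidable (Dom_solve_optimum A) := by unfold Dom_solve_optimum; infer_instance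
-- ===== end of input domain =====

-- B replaces A's four buckets + two destructive pair-from-the-end loops by one sorted copy
-- scanned with two pointers (objective: simpler; same O(n log n) cost).

-- ===== PORT A =====
-- the `while len(xs) >= 2: pairs.append(xs[-1]*xs[-2]); del xs[-2:]` loop (A has it twice, verbatim)
def pyPairLoop (xs pairs : List Int) : List Int × List Int :=
  if 2 ≤ xs.length then
    pyPairLoop (xs.take (xs.length - 2))
      (pairs ++ [((PySem.List.pyGet? xs (-1)).getD 0) * ((PySem.List.pyGet? xs (-2)).getD 0)])
  else (xs, pairs)
termination_by xs.length
decreasing_by simp [List.length_take]; omega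

def solve_optimum (A : List Int) : Int :=
  -- the partition loop (lists built by append, as in Python)
  let p := A.foldl (fun st a =>
    if a ≤ -1 then (st.1 ++ [a], st.2.1, st.2.2.1, st.2.2.2)
    else if a = 0 then (st.1, st.2.1, st.2.2.1 ++ [a], st.2.2.2)
    else if a = 1 then (st.1, st.2.1, st.2.2.1, st.2.2.2 ++ [a])
    else (st.1, st.2.1 ++ [a], st.2.2.1, st.2.2.2)) (([], [], [], []) : List Int × List Int × List Int × List Int)
  let zeros := p.2.2.1
  let ones := p.2.2.2
  let negatives := PySem.List.sorted p.1 (fun x => x) true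
  let np := pyPairLoop negatives []
  let positives := PySem.List.sorted p.2.1 (fun x => x) false
  let pp := pyPairLoop positives np.2
  -- the assert always holds and is a no-op; `del zeros[-1]` is dead (zeros is not used afterwards)
  let negatives2 := if zeros ≠ [] ∧ np.1 ≠ [] then np.1.dropLast else np.1
  let pairs := if ones ≠ [] then pp.2 ++ [ones.sum] else pp.2
  pp.1.sum + negatives2.sum + pairs.sum

-- ===== PORT B =====
-- `while i + 1 < n and s[i+1] <= 0: total += s[i]*s[i+1]; i += 2`
def altLeftWhile (s : List Int) (i : Nat) (total : Int) : Nat × Int :=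
  if i + 1 < s.length ∧ s.getD (i + 1) 0 ≤ 0 then
    altLeftWhile s (i + 2) (total + s.getD i 0 * s.getD (i + 1) 0)
  else (i, total)
termination_by s.length - i
decreasing_by omega

-- `while j - 1 >= i and s[j-1] > 1: total += s[j]*s[j-1]; j -= 2`
def altRightWhile (s : List Int) (i : Nat) (j : Int) (total : Int) : Int × Int :=
  if j - 1 ≥ (i : Int) ∧ 1 < (PySem.List.pyGet? s (j - 1)).getD 0 then
    altRightWhile s i (j - 2) (total + ((PySem.List.pyGet? s j).getD 0) * ((PySem.List.pyGet? s (j - 1)).getD 0))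
  else (j, total)
termination_by (j + 1 - i).toNat
decreasing_by omega

def solve_optimum_alt (A : List Int) : Int :=
  let s := PySem.List.sorted A (fun x => x) false
  let n := s.length
  let lw := altLeftWhile s 0 0
  let l2 := if lw.1 < n ∧ s.getD lw.1 0 ≤ 0 then (lw.1 + 1, lw.2 + s.getD lw.1 0) else lw
  let rw := altRightWhile s l2.1 ((n : Int) - 1) l2.2
  let r2 := if (l2.1 : Int) ≤ rw.1 ∧ 1 < (PySem.List.pyGet? s rw.1).getD 0
            then (rw.1 - 1, rw.2 + (PySem.List.pyGet? s rw.1).getD 0) else rw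
  r2.2 + (if (l2.1 : Int) ≤ r2.1 then r2.1 - l2.1 + 1 else 0)

-- ===== PRECONDITION & SPEC =====
def Spec_solve_optimum (A : List Int) (out : Int) : Prop := out = solve_optimum_alt A
instance (A : List Int) (out : Int) : Decidable (Spec_solve_optimum A out) := by unfold Spec_solve_optimum; infer_instance

-- ===== CLAIM (what is proved, stated in full; the proofs are below) =====
def Claim_equal_solve_optimum : Prop := ∀ (A : List Int), Dom_solve_optimum A → Spec_solve_optimum A (solve_optimum A)

-- ===== LEMMAS AND PROOFS =====

-- the products of adjacent pairs taken from the front, and the odd leftover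
def pairList : List Int → List Int
  | a :: b :: r => (a * b) :: pairList r
  | _ => []

def loList : List Int → List Int
  | [] => []
  | [a] => [a]
  | _ :: _ :: r => loList r

theorem loList_len_le (l : List Int) : (loList l).length ≤ 1 := by
  induction l using loList.induct <;> simp [loList, *]

theorem pyPairLoop_rev (r : List Int) : ∀ pairs,
    pyPairLoop r.reverse pairs = (loList r, pairs ++ pairList r) := by
  induction r using loList.induct with
  | case1 => intro pairs; rw [pyPairLoop]; simp [loList, pairList]
  | case2 a => intro pairs; rw [pyPairLoop]; simp [loList, pairList]
  | case3 a b t ih =>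
    intro pairs
    have hrev : (a :: b :: t).reverse = t.reverse ++ [b, a] := by simp
    have hlen : (t.reverse ++ [b, a]).length = t.length + 2 := by simp
    rw [hrev, pyPairLoop]
    have h2 : 2 ≤ (t.reverse ++ [b, a]).length := by simp
    rw [if_pos h2]
    have htake : (t.reverse ++ [b, a]).take ((t.reverse ++ [b, a]).length - 2) = t.reverse := by
      rw [hlen]; exact List.take_left' (by simp)
    have hm1 : (PySem.List.pyGet? (t.reverse ++ [b, a]) (-1)).getD 0 = a := by
      rw [PySem.List.pyGet?_neg_one]
      simp [List.getLast?_append]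
    have hm2 : (PySem.List.pyGet? (t.reverse ++ [b, a]) (-2)).getD 0 = b := by
      rw [PySem.List.pyGet?_neg_ofNat _ 2 (by omega) (by simp)]
      rw [hlen]
      simp
    rw [htake, hm1, hm2, ih]
    simp [loList, pairList]

theorem sorted_rev_eq_reverse (xs : List Int) :
    PySem.List.sorted xs (fun x => x) true = (PySem.List.sorted xs (fun x => x) false).reverse := by
  refine List.Perm.eq_of_pairwise (le := fun a b : Int => b ≤ a)
    (fun a b _ _ h1 h2 => by omega)
    (PySem.List.sorted_pairwise_rev xs (fun x => x))
    (List.pairwise_reverse.mpr (by simpa using PySem.List.sorted_pairwise xs (fun x => x)))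
    (((PySem.List.sorted_perm xs _ true).trans (PySem.List.sorted_perm xs _ false).symm).trans
      (List.reverse_perm _).symm)

theorem partition_eq (A : List Int) :
    A.foldl (fun st a =>
      if a ≤ -1 then (st.1 ++ [a], st.2.1, st.2.2.1, st.2.2.2)
      else if a = 0 then (st.1, st.2.1, st.2.2.1 ++ [a], st.2.2.2)
      else if a = 1 then (st.1, st.2.1, st.2.2.1, st.2.2.2 ++ [a])
      else (st.1, st.2.1 ++ [a], st.2.2.1, st.2.2.2)) (([], [], [], []) : List Int × List Int × List Int × List Int)
    = (A.filter (fun a => decide (a ≤ -1)), A.filter (fun a => decide (1 < a)),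
       A.filter (fun a => decide (a = 0)), A.filter (fun a => decide (a = 1))) := by
  suffices h : ∀ (n0 p0 z0 o0 : List Int),
      A.foldl (fun st a =>
        if a ≤ -1 then (st.1 ++ [a], st.2.1, st.2.2.1, st.2.2.2)
        else if a = 0 then (st.1, st.2.1, st.2.2.1 ++ [a], st.2.2.2)
        else if a = 1 then (st.1, st.2.1, st.2.2.1, st.2.2.2 ++ [a])
        else (st.1, st.2.1 ++ [a], st.2.2.1, st.2.2.2)) (n0, p0, z0, o0)
      = (n0 ++ A.filter (fun a => decide (a ≤ -1)), p0 ++ A.filter (fun a => decide (1 < a)),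
         z0 ++ A.filter (fun a => decide (a = 0)), o0 ++ A.filter (fun a => decide (a = 1))) by
    simpa using h [] [] [] []
  induction A with
  | nil => intro n0 p0 z0 o0; simp
  | cons a t ih =>
    intro n0 p0 z0 o0
    by_cases h1 : a ≤ -1
    · simp [List.foldl_cons, h1, List.filter_cons, ih, show ¬(1 < a) by omega,
        show a ≠ 0 by omega, show a ≠ 1 by omega]
    · by_cases h2 : a = 0
      · simp [List.foldl_cons, h1, h2, List.filter_cons, ih]
      · by_cases h3 : a = 1
        · simp [List.foldl_cons, h1, h2, h3, List.filter_cons, ih]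
        · simp [List.foldl_cons, h1, h2, h3, List.filter_cons, ih, show 1 < a by omega]

theorem sorted_decomp (A : List Int) :
    PySem.List.sorted A (fun x => x) false =
      PySem.List.sorted (A.filter (fun a => decide (a ≤ -1))) (fun x => x) false
      ++ A.filter (fun a => decide (a = 0))
      ++ A.filter (fun a => decide (a = 1))
      ++ PySem.List.sorted (A.filter (fun a => decide (1 < a))) (fun x => x) false := by
  have hperm0 : (A.filter (fun a => decide (a ≤ -1)) ++ A.filter (fun a => decide (a = 0))
      ++ A.filter (fun a => decide (a = 1)) ++ A.filter (fun a => decide (1 < a))).Perm A := by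
    induction A with
    | nil => simp
    | cons a t ih =>
      by_cases h1 : a ≤ -1
      · simp only [List.filter_cons, show (decide (a ≤ -1)) = true by simpa using h1,
          show (decide (a = 0)) = false by simp; omega, show (decide (a = 1)) = false by simp; omega,
          show (decide (1 < a)) = false by simp; omega, if_true, if_false, List.cons_append]
        exact ih.cons a
      · by_cases h2 : a = 0
        · simp only [List.filter_cons, show (decide (a ≤ -1)) = false by simp; omega,
            show (decide (a = 0)) = true by simpa using h2, show (decide (a = 1)) = false by simp; omega,
            show (decide (1 < a)) = false by simp; omega, if_true, if_false]
          refine List.Perm.trans ?_ (ih.cons a)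
          simpa [List.append_assoc] using
            (List.perm_middle (a := a) (l₁ := t.filter (fun a => decide (a ≤ -1)))
              (l₂ := t.filter (fun a => decide (a = 0)) ++ t.filter (fun a => decide (a = 1))
                ++ t.filter (fun a => decide (1 < a))))
        · by_cases h3 : a = 1
          · simp only [List.filter_cons, show (decide (a ≤ -1)) = false by simp; omega,
              show (decide (a = 0)) = false by simp; omega, show (decide (a = 1)) = true by simpa using h3,
              show (decide (1 < a)) = false by simp; omega, if_true, if_false]
            refine List.Perm.trans ?_ (ih.cons a)
            simpa [List.append_assoc] using
              (List.perm_middle (a := a)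
                (l₁ := t.filter (fun a => decide (a ≤ -1)) ++ t.filter (fun a => decide (a = 0)))
                (l₂ := t.filter (fun a => decide (a = 1)) ++ t.filter (fun a => decide (1 < a))))
          · simp only [List.filter_cons, show (decide (a ≤ -1)) = false by simp; omega,
              show (decide (a = 0)) = false by simpa using h2, show (decide (a = 1)) = false by simpa using h3,
              show (decide (1 < a)) = true by simp; omega, if_true, if_false]
            refine List.Perm.trans ?_ (ih.cons a)
            simpa [List.append_assoc] using
              (List.perm_middle (a := a)
                (l₁ := t.filter (fun a => decide (a ≤ -1)) ++ t.filter (fun a => decide (a = 0))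
                  ++ t.filter (fun a => decide (a = 1)))
                (l₂ := t.filter (fun a => decide (1 < a))))
  apply PySem.List.sorted_id_eq_of_perm_of_pairwise
  · refine List.Perm.trans ?_ hperm0
    refine List.Perm.append (List.Perm.append (List.Perm.append ?_ (List.Perm.refl _)) (List.Perm.refl _)) ?_
    · exact PySem.List.sorted_perm _ _ false
    · exact PySem.List.sorted_perm _ _ false
  · have mN : ∀ x ∈ PySem.List.sorted (A.filter (fun a => decide (a ≤ -1))) (fun x => x) false, x ≤ -1 := by
      intro x hx
      have := (PySem.List.mem_sorted _ _ _ x).mp hx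
      simpa using (List.mem_filter.mp this).2
    have mZ : ∀ x ∈ A.filter (fun a => decide (a = 0)), x = 0 := by
      intro x hx; simpa using (List.mem_filter.mp hx).2
    have mO : ∀ x ∈ A.filter (fun a => decide (a = 1)), x = 1 := by
      intro x hx; simpa using (List.mem_filter.mp hx).2
    have mP : ∀ x ∈ PySem.List.sorted (A.filter (fun a => decide (1 < a))) (fun x => x) false, 1 < x := by
      intro x hx
      have := (PySem.List.mem_sorted _ _ _ x).mp hx
      simpa using (List.mem_filter.mp this).2
    rw [List.append_assoc, List.append_assoc]
    rw [List.pairwise_append]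
    refine ⟨by simpa using PySem.List.sorted_pairwise (A.filter (fun a => decide (a ≤ -1))) (fun x => x), ?_, ?_⟩
    · rw [List.pairwise_append]
      refine ⟨List.pairwise_of_forall_mem_list (fun a ha b hb => by
          rw [mZ a ha, mZ b hb]), ?_, ?_⟩
      · rw [List.pairwise_append]
        refine ⟨List.pairwise_of_forall_mem_list (fun a ha b hb => by rw [mO a ha, mO b hb]), ?_, ?_⟩
        · simpa using PySem.List.sorted_pairwise (A.filter (fun a => decide (1 < a))) (fun x => x)
        · intro a ha b hb
          have := mO a ha; have := mP b hb; omega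
      · intro a ha b hb
        have := mZ a ha
        rcases List.mem_append.mp hb with h | h
        · have := mO b h; omega
        · have := mP b h; omega
    · intro a ha b hb
      have := mN a ha
      rcases List.mem_append.mp hb with h | h
      · have := mZ b h; omega
      · rcases List.mem_append.mp h with h' | h'
        · have := mO b h'; omega
        · have := mP b h'; omega

theorem getD_pre (pre l : List Int) (k : Nat) :
    (pre ++ l).getD (pre.length + k) 0 = l.getD k 0 := by
  rw [List.getD_append_right pre l 0 (pre.length + k) (by omega)]
  simp

theorem altLeftWhile_eq (P rest : List Int) (hP : ∀ x ∈ P, x ≤ 0) (hr : ∀ x ∈ rest, 0 < x) :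
    ∀ (pre : List Int) (total : Int),
    altLeftWhile (pre ++ P ++ rest) pre.length total
      = (pre.length + 2 * (pairList P).length, total + (pairList P).sum) := by
  induction P using loList.induct with
  | case1 =>
    intro pre total
    rw [altLeftWhile]
    rw [if_neg]
    · simp [pairList]
    rintro ⟨hlen, hval⟩
    simp only [List.length_append] at hlen
    rcases rest with _ | ⟨c1, _ | ⟨c2, r⟩⟩
    · simp at hlen
    · simp at hlen
    · have : (pre ++ [] ++ c1 :: c2 :: r).getD (pre.length + 1) 0 = c2 := by
        rw [show pre ++ [] ++ c1 :: c2 :: r = pre ++ c1 :: c2 :: r by simp, getD_pre]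
        simp
      rw [this] at hval
      have := hr c2 (by simp)
      omega
  | case2 a =>
    intro pre total
    rw [altLeftWhile]
    rw [if_neg]
    · simp [pairList]
    rintro ⟨hlen, hval⟩
    simp only [List.length_append, List.length_cons, List.length_nil] at hlen
    rcases rest with _ | ⟨c1, r⟩
    · simp at hlen
    · have : (pre ++ [a] ++ c1 :: r).getD (pre.length + 1) 0 = c1 := by
        rw [show pre ++ [a] ++ c1 :: r = pre ++ a :: c1 :: r by simp, getD_pre]
        simp
      rw [this] at hval
      have := hr c1 (by simp)
      omega
  | case3 a b t ih =>
    intro pre total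
    have hab : (pre ++ (a :: b :: t) ++ rest) = pre ++ [a, b] ++ (t ++ rest) := by simp
    have hga : (pre ++ (a :: b :: t) ++ rest).getD pre.length 0 = a := by
      rw [List.append_assoc, show pre.length = pre.length + 0 by omega, getD_pre]
      simp
    have hgb : (pre ++ (a :: b :: t) ++ rest).getD (pre.length + 1) 0 = b := by
      rw [List.append_assoc, getD_pre]
      simp
    rw [altLeftWhile, if_pos]
    · rw [hga, hgb]
      have ih' := ih (fun x hx => hP x (by simp [hx])) (pre ++ [a, b]) (total + a * b)
      have hlen2 : (pre ++ [a, b]).length = pre.length + 2 := by simp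
      rw [hlen2] at ih'
      rw [hab, show pre ++ [a, b] ++ (t ++ rest) = pre ++ [a, b] ++ t ++ rest by simp, ih']
      simp only [pairList, List.length_cons, List.sum_cons, Prod.mk.injEq]
      constructor
      · omega
      · ring
    · constructor
      · simp
      · rw [hgb]; exact hP b (by simp)

theorem rev_drop_get (s : List Int) (i d k : Nat) (u : List Int)
    (hu : (s.drop i).reverse.drop d = u) (hk : k < u.length) (hd : i + d ≤ s.length) :
    s[s.length - 1 - d - k]? = u[k]? := by
  have hlen : ((s.drop i).reverse.drop d).length = s.length - i - d := by simp
  rw [hu] at hlen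
  have h1 : u[k]? = (s.drop i).reverse[d + k]? := by rw [← hu, List.getElem?_drop]
  rw [h1, List.getElem?_reverse (by simp; omega), List.getElem?_drop]
  congr 1
  simp
  omega

theorem altRightWhile_eq (s : List Int) (i : Nat) (R M : List Int)
    (hR : ∀ x ∈ R, 1 < x) (hM : ∀ x ∈ M, x ≤ 1) :
    ∀ (d : Nat) (total : Int), (s.drop i).reverse.drop d = R ++ M → i + d ≤ s.length →
    altRightWhile s i ((s.length : Int) - 1 - d) total
      = ((s.length : Int) - 1 - d - 2 * (pairList R).length, total + (pairList R).sum) := by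
  induction R using loList.induct with
  | case1 =>
    intro d total hu hd
    have hlen_u : s.length - i - d = M.length := by
      have := congrArg List.length hu; simpa using this
    rw [altRightWhile, if_neg]
    · simp [pairList]
    rintro ⟨h1, h2⟩
    have hge2 : 2 ≤ M.length := by omega
    rcases M with _ | ⟨m1, _ | ⟨m2, M'⟩⟩
    · simp at hge2
    · simp at hge2
    · have hg : (PySem.List.pyGet? s ((s.length : Int) - 1 - d - 1)).getD 0 = m2 := by
        rw [show (s.length : Int) - 1 - d - 1 = ((s.length - 2 - d : Nat) : Int) by push_cast; omega,
          PySem.List.pyGet?_natCast,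
          show s.length - 2 - d = s.length - 1 - d - 1 by omega,
          rev_drop_get s i d 1 _ hu (by simp) hd]
        simp
      rw [hg] at h2
      have := hM m2 (by simp)
      omega
  | case2 a =>
    intro d total hu hd
    have hlen_u : s.length - i - d = M.length + 1 := by
      have := congrArg List.length hu; simpa using this
    rw [altRightWhile, if_neg]
    · simp [pairList]
    rintro ⟨h1, h2⟩
    have hge1 : 1 ≤ M.length := by omega
    rcases M with _ | ⟨m1, M'⟩
    · simp at hge1
    · have hg : (PySem.List.pyGet? s ((s.length : Int) - 1 - d - 1)).getD 0 = m1 := by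
        rw [show (s.length : Int) - 1 - d - 1 = ((s.length - 2 - d : Nat) : Int) by push_cast; omega,
          PySem.List.pyGet?_natCast,
          show s.length - 2 - d = s.length - 1 - d - 1 by omega,
          rev_drop_get s i d 1 _ hu (by simp) hd]
        simp
      rw [hg] at h2
      have := hM m1 (by simp)
      omega
  | case3 a b t ih =>
    intro d total hu hd
    have hlen_u : s.length - i - d = t.length + M.length + 2 := by
      have := congrArg List.length hu; simp at this; omega
    have hga : (PySem.List.pyGet? s ((s.length : Int) - 1 - d)).getD 0 = a := by
      rw [show (s.length : Int) - 1 - d = ((s.length - 1 - d : Nat) : Int) by push_cast; omega,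
        PySem.List.pyGet?_natCast,
        show s.length - 1 - d = s.length - 1 - d - 0 by omega,
        rev_drop_get s i d 0 _ hu (by simp) hd]
      simp
    have hgb : (PySem.List.pyGet? s ((s.length : Int) - 1 - d - 1)).getD 0 = b := by
      rw [show (s.length : Int) - 1 - d - 1 = ((s.length - 2 - d : Nat) : Int) by push_cast; omega,
        PySem.List.pyGet?_natCast,
        show s.length - 2 - d = s.length - 1 - d - 1 by omega,
        rev_drop_get s i d 1 _ hu (by simp) hd]
      simp
    rw [altRightWhile, if_pos]
    · rw [hga, hgb]
      have hu2 : (s.drop i).reverse.drop (d + 2) = t ++ M := by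
        rw [show d + 2 = d + 2 by rfl, ← List.drop_drop, hu]
        simp
      have ih' := ih (fun x hx => hR x (by simp [hx])) (d + 2) (total + a * b) hu2 (by omega)
      rw [show (s.length : Int) - 1 - (d : Int) - 2 = (s.length : Int) - 1 - ((d + 2 : Nat) : Int) by push_cast; ring,
        ih']
      simp only [pairList, List.length_cons, List.sum_cons, Prod.mk.injEq]
      constructor
      · push_cast; ring
      · ring
    · constructor
      · omega
      · rw [hgb]; exact hR b (by simp)

theorem pairList_len (l : List Int) : l.length = 2 * (pairList l).length + (loList l).length := by
  induction l using loList.induct <;> simp [pairList, loList, *] <;> omega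

theorem loList_eq_drop (l : List Int) : loList l = l.drop (2 * (pairList l).length) := by
  induction l using loList.induct with
  | case1 => simp [pairList, loList]
  | case2 a => simp [pairList, loList]
  | case3 a b t ih => simp [pairList, loList, ih, show 2 * ((pairList t).length + 1) = 2 * (pairList t).length + 1 + 1 by omega]

theorem ones_sum (l : List Int) (h : ∀ x ∈ l, x = 1) : l.sum = l.length := by
  induction l with
  | nil => simp
  | cons a t ih =>
    simp only [List.sum_cons, List.length_cons, h a (by simp)]
    rw [ih (fun x hx => h x (by simp [hx]))]
    push_cast
    ring

theorem zeros_pair (Z : List Int) (hZ : ∀ x ∈ Z, x = 0) :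
    (pairList Z).sum = 0 ∧ (loList Z).sum = 0 := by
  induction Z using loList.induct with
  | case1 => simp [pairList, loList]
  | case2 a => simp [pairList, loList, hZ a (by simp)]
  | case3 a b t ih =>
    have := ih (fun x hx => hZ x (by simp [hx]))
    simp [pairList, loList, hZ a (by simp), this]

theorem neg_zero_eq (N Z : List Int) (hZ : ∀ x ∈ Z, x = 0) :
    (pairList (N ++ Z)).sum + (loList (N ++ Z)).sum
      = (pairList N).sum
        + (if Z ≠ [] ∧ loList N ≠ [] then (loList N).dropLast else loList N).sum := by
  induction N using loList.induct with
  | case1 =>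
    simp only [List.nil_append, pairList, loList, ne_eq, List.sum_nil]
    rw [if_neg (by simp)]
    have := zeros_pair Z hZ
    simp [pairList, loList, this.1, this.2]
  | case2 a =>
    rcases Z with _ | ⟨z, Z'⟩
    · simp [pairList, loList]
    · have hz : z = 0 := hZ z (by simp)
      have := zeros_pair Z' (fun x hx => hZ x (by simp [hx]))
      simp [pairList, loList, hz, this.1, this.2]
  | case3 a b t ih =>
    simp only [List.cons_append, pairList, loList, List.sum_cons, ne_eq] at *
    linarith [ih]

theorem A_side (A : List Int) :
    solve_optimum A =
      (loList (PySem.List.sorted (A.filter (fun a => decide (1 < a))) (fun x => x) false).reverse).sum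
      + (if A.filter (fun a => decide (a = 0)) ≠ []
            ∧ loList (PySem.List.sorted (A.filter (fun a => decide (a ≤ -1))) (fun x => x) false) ≠ []
         then (loList (PySem.List.sorted (A.filter (fun a => decide (a ≤ -1))) (fun x => x) false)).dropLast
         else loList (PySem.List.sorted (A.filter (fun a => decide (a ≤ -1))) (fun x => x) false)).sum
      + ((pairList (PySem.List.sorted (A.filter (fun a => decide (a ≤ -1))) (fun x => x) false)).sum
         + (pairList (PySem.List.sorted (A.filter (fun a => decide (1 < a))) (fun x => x) false).reverse).sum
         + (A.filter (fun a => decide (a = 1))).sum) := by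
  have hPP : ∀ pairs, pyPairLoop (PySem.List.sorted (A.filter (fun a => decide (1 < a))) (fun x => x) false) pairs
      = (loList (PySem.List.sorted (A.filter (fun a => decide (1 < a))) (fun x => x) false).reverse,
         pairs ++ pairList (PySem.List.sorted (A.filter (fun a => decide (1 < a))) (fun x => x) false).reverse) := by
    intro pairs
    conv_lhs => rw [show (PySem.List.sorted (A.filter (fun a => decide (1 < a))) (fun x => x) false)
      = (PySem.List.sorted (A.filter (fun a => decide (1 < a))) (fun x => x) false).reverse.reverse by simp]
    exact pyPairLoop_rev _ pairs
  unfold solve_optimum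
  rw [partition_eq]
  simp only []
  rw [sorted_rev_eq_reverse, pyPairLoop_rev _ []]
  simp only [List.nil_append]
  rw [hPP]
  by_cases hOne : A.filter (fun a => decide (a = 1)) ≠ []
  · rw [if_pos hOne]
    simp [List.sum_append]
    ring
  · rw [if_neg hOne]
    rw [not_not] at hOne
    simp [hOne, List.sum_append]

theorem getE_pre (pre l : List Int) (k : Nat) : (pre ++ l)[pre.length + k]? = l[k]? := by
  rw [List.getElem?_append_right (by omega)]
  congr 1
  omega

theorem B_side (A : List Int) :
    solve_optimum_alt A =
      (pairList ((PySem.List.sorted (A.filter (fun a => decide (a ≤ -1))) (fun x => x) false)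
          ++ A.filter (fun a => decide (a = 0)))).sum
      + (loList ((PySem.List.sorted (A.filter (fun a => decide (a ≤ -1))) (fun x => x) false)
          ++ A.filter (fun a => decide (a = 0)))).sum
      + (pairList (PySem.List.sorted (A.filter (fun a => decide (1 < a))) (fun x => x) false).reverse).sum
      + (loList (PySem.List.sorted (A.filter (fun a => decide (1 < a))) (fun x => x) false).reverse).sum
      + ((A.filter (fun a => decide (a = 1))).length : Int) := by
  unfold solve_optimum_alt
  rw [sorted_decomp A]
  set N := PySem.List.sorted (A.filter (fun a => decide (a ≤ -1))) (fun x => x) false with hN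
  set P := PySem.List.sorted (A.filter (fun a => decide (1 < a))) (fun x => x) false with hP
  set Z := A.filter (fun a => decide (a = 0)) with hZ
  set O := A.filter (fun a => decide (a = 1)) with hO
  have mN : ∀ x ∈ N, x ≤ -1 := by
    intro x hx
    have := (PySem.List.mem_sorted _ _ _ x).mp hx
    simpa using (List.mem_filter.mp this).2
  have mZ : ∀ x ∈ Z, x = 0 := by
    intro x hx; simpa using (List.mem_filter.mp hx).2
  have mO : ∀ x ∈ O, x = 1 := by
    intro x hx; simpa using (List.mem_filter.mp hx).2
  have mP : ∀ x ∈ P, 1 < x := by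
    intro x hx
    have := (PySem.List.mem_sorted _ _ _ x).mp hx
    simpa using (List.mem_filter.mp this).2
  simp only [List.append_assoc]
  have hleft : altLeftWhile (N ++ (Z ++ (O ++ P))) 0 0
      = (2 * (pairList (N ++ Z)).length, (pairList (N ++ Z)).sum) := by
    have h := altLeftWhile_eq (N ++ Z) (O ++ P)
      (fun x hx => by
        rcases List.mem_append.mp hx with h | h
        · have := mN x h; omega
        · have := mZ x h; omega)
      (fun x hx => by
        rcases List.mem_append.mp hx with h | h
        · have := mO x h; omega
        · have := mP x h; omega)
      [] 0
    simpa [List.append_assoc] using h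
  rw [hleft]
  dsimp only
  have hkl := pairList_len (N ++ Z)
  have hdropNZ := loList_eq_drop (N ++ Z)
  have hslen : (N ++ (Z ++ (O ++ P))).length = (N ++ Z).length + O.length + P.length := by
    simp [List.length_append]
    omega
  have hl2 : (if 2 * (pairList (N ++ Z)).length < (N ++ (Z ++ (O ++ P))).length ∧
        (N ++ (Z ++ (O ++ P))).getD (2 * (pairList (N ++ Z)).length) 0 ≤ 0 then
        (2 * (pairList (N ++ Z)).length + 1,
          (pairList (N ++ Z)).sum + (N ++ (Z ++ (O ++ P))).getD (2 * (pairList (N ++ Z)).length) 0)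
      else (2 * (pairList (N ++ Z)).length, (pairList (N ++ Z)).sum))
      = ((N ++ Z).length, (pairList (N ++ Z)).sum + (loList (N ++ Z)).sum) := by
    have hll := loList_len_le (N ++ Z)
    rcases hc : loList (N ++ Z) with _ | ⟨c, rest⟩
    · -- even case: no leftover
      rw [hc] at hkl
      simp only [List.length_nil] at hkl
      rcases hOP : O ++ P with _ | ⟨c1, r1⟩
      · rw [hOP] at hslen
        have hOl : O.length + P.length = 0 := by
          have := congrArg List.length hOP; simpa using this
        rw [if_neg (by rintro ⟨h1, _⟩; omega)]
        simp only [List.sum_nil, Prod.mk.injEq]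
        exact ⟨by omega, by ring⟩
      · rw [hOP] at hslen
        have hval : (N ++ (Z ++ c1 :: r1)).getD (2 * (pairList (N ++ Z)).length) 0 = c1 := by
          rw [show N ++ (Z ++ c1 :: r1) = (N ++ Z) ++ (c1 :: r1) by simp,
            show 2 * (pairList (N ++ Z)).length = (N ++ Z).length + 0 by omega,
            getD_pre]
          simp
        have hc1 : 0 < c1 := by
          have hmem : c1 ∈ O ++ P := by rw [hOP]; simp
          rcases List.mem_append.mp hmem with h | h
          · have := mO c1 h; omega
          · have := mP c1 h; omega
        rw [if_neg (by rintro ⟨_, h2⟩; rw [hval] at h2; omega)]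
        simp only [List.sum_nil, Prod.mk.injEq]
        exact ⟨by omega, by ring⟩
    · -- odd case: leftover c
      have hrest : rest = [] := by
        rw [hc] at hll; simp at hll; simpa using hll
      subst hrest
      rw [hc] at hkl hdropNZ
      simp only [List.length_cons, List.length_nil] at hkl
      have hgetc : (N ++ Z)[2 * (pairList (N ++ Z)).length]? = some c := by
        rw [show 2 * (pairList (N ++ Z)).length = 2 * (pairList (N ++ Z)).length + 0 by omega,
          ← List.getElem?_drop, ← hdropNZ]
        simp
      have hval : (N ++ (Z ++ (O ++ P))).getD (2 * (pairList (N ++ Z)).length) 0 = c := by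
        rw [show N ++ (Z ++ (O ++ P)) = (N ++ Z) ++ (O ++ P) by simp]
        rw [List.getD_append _ _ _ _ (by omega)]
        rw [List.getD_eq_getElem?_getD, hgetc]
        rfl
      have hcmem : c ∈ N ++ Z := by
        have : c ∈ (N ++ Z).drop (2 * (pairList (N ++ Z)).length) := by rw [← hdropNZ]; simp
        exact List.mem_of_mem_drop this
      have hcle : c ≤ 0 := by
        rcases List.mem_append.mp hcmem with h | h
        · have := mN c h; omega
        · have := mZ c h; omega
      rw [if_pos ⟨by omega, by rw [hval]; exact hcle⟩]
      rw [hval]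
      simp only [List.sum_cons, List.sum_nil, Prod.mk.injEq]
      exact ⟨by omega, by ring⟩
  rw [hl2]
  dsimp only
  have hklP := pairList_len P.reverse
  have hdropP := loList_eq_drop P.reverse
  have hrw : altRightWhile (N ++ (Z ++ (O ++ P))) (N ++ Z).length
      ((↑(N ++ (Z ++ (O ++ P))).length : Int) - 1) ((pairList (N ++ Z)).sum + (loList (N ++ Z)).sum)
      = ((↑(N ++ (Z ++ (O ++ P))).length : Int) - 1 - 2 * (pairList P.reverse).length,
         (pairList (N ++ Z)).sum + (loList (N ++ Z)).sum + (pairList P.reverse).sum) := by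
    have hu : ((N ++ (Z ++ (O ++ P))).drop (N ++ Z).length).reverse.drop 0
        = P.reverse ++ O.reverse := by
      rw [show N ++ (Z ++ (O ++ P)) = (N ++ Z) ++ (O ++ P) by simp, List.drop_left]
      simp
    have h := altRightWhile_eq (N ++ (Z ++ (O ++ P))) (N ++ Z).length P.reverse O.reverse
      (fun x hx => mP x (by simpa using hx))
      (fun x hx => by have := mO x (by simpa using hx); omega)
      0 ((pairList (N ++ Z)).sum + (loList (N ++ Z)).sum) hu (by omega)
    simpa using h
  rw [hrw]
  dsimp only
  have hPlen : P.length = 2 * (pairList P.reverse).length + (loList P.reverse).length := by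
    simpa using hklP
  have hr2 : (if ↑(N ++ Z).length ≤ (↑(N ++ (Z ++ (O ++ P))).length : Int) - 1 - 2 * ↑(pairList P.reverse).length ∧
        1 < (PySem.List.pyGet? (N ++ (Z ++ (O ++ P)))
              ((↑(N ++ (Z ++ (O ++ P))).length : Int) - 1 - 2 * ↑(pairList P.reverse).length)).getD 0 then
        ((↑(N ++ (Z ++ (O ++ P))).length : Int) - 1 - 2 * ↑(pairList P.reverse).length - 1,
          (pairList (N ++ Z)).sum + (loList (N ++ Z)).sum + (pairList P.reverse).sum +
            (PySem.List.pyGet? (N ++ (Z ++ (O ++ P)))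
              ((↑(N ++ (Z ++ (O ++ P))).length : Int) - 1 - 2 * ↑(pairList P.reverse).length)).getD 0)
      else
        ((↑(N ++ (Z ++ (O ++ P))).length : Int) - 1 - 2 * ↑(pairList P.reverse).length,
          (pairList (N ++ Z)).sum + (loList (N ++ Z)).sum + (pairList P.reverse).sum))
      = ((↑(N ++ Z).length : Int) + ↑O.length - 1,
         (pairList (N ++ Z)).sum + (loList (N ++ Z)).sum + (pairList P.reverse).sum
           + (loList P.reverse).sum) := by
    rcases hcP : loList P.reverse with _ | ⟨q, restq⟩
    · rw [hcP] at hPlen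
      simp only [List.length_nil] at hPlen
      have hcond : ¬ (↑(N ++ Z).length ≤ (↑(N ++ (Z ++ (O ++ P))).length : Int) - 1 - 2 * ↑(pairList P.reverse).length ∧
          1 < (PySem.List.pyGet? (N ++ (Z ++ (O ++ P)))
                ((↑(N ++ (Z ++ (O ++ P))).length : Int) - 1 - 2 * ↑(pairList P.reverse).length)).getD 0) := by
        by_cases hOe : O = []
        · rintro ⟨h1, _⟩
          have hO0 : O.length = 0 := by rw [hOe]; rfl
          omega
        · rintro ⟨_, h2⟩
          have hOpos : 0 < O.length := List.length_pos_iff.mpr hOe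
          have hidx : ((↑(N ++ (Z ++ (O ++ P))).length : Int) - 1 - 2 * ↑(pairList P.reverse).length)
              = (((N ++ Z).length + (O.length - 1) : Nat) : Int) := by omega
          rw [hidx, PySem.List.pyGet?_natCast] at h2
          have hval : (N ++ (Z ++ (O ++ P)))[(N ++ Z).length + (O.length - 1)]? = O[O.length - 1]? := by
            rw [show N ++ (Z ++ (O ++ P)) = (N ++ Z) ++ (O ++ P) by simp, getE_pre]
            exact List.getElem?_append_left (by omega)
          rw [hval, List.getElem?_eq_getElem (by omega)] at h2
          have := mO (O[O.length - 1]'(by omega)) (List.getElem_mem _)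
          simp only [Option.getD_some] at h2
          omega
      rw [if_neg hcond]
      simp only [hcP, List.sum_nil, Prod.mk.injEq]
      exact ⟨by omega, by ring⟩
    · have hrq : restq = [] := by
        have := loList_len_le P.reverse
        rw [hcP] at this
        simpa using this
      subst hrq
      rw [hcP] at hPlen hdropP
      simp only [List.length_cons, List.length_nil] at hPlen
      have hq? : P[0]? = some q := by
        have h1 : P.reverse[2 * (pairList P.reverse).length + 0]? = some q := by
          rw [← List.getElem?_drop, ← hdropP]
          simp
        rw [Nat.add_zero, List.getElem?_reverse (by omega)] at h1
        rw [show P.length - 1 - 2 * (pairList P.reverse).length = 0 by omega] at h1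
        exact h1
      have hqmem : q ∈ P := List.mem_of_getElem? hq?
      have hidx : ((↑(N ++ (Z ++ (O ++ P))).length : Int) - 1 - 2 * ↑(pairList P.reverse).length)
          = (((N ++ Z).length + O.length : Nat) : Int) := by omega
      have hval : (PySem.List.pyGet? (N ++ (Z ++ (O ++ P)))
            ((↑(N ++ (Z ++ (O ++ P))).length : Int) - 1 - 2 * ↑(pairList P.reverse).length)).getD 0 = q := by
        rw [hidx, PySem.List.pyGet?_natCast,
          show N ++ (Z ++ (O ++ P)) = ((N ++ Z) ++ O) ++ P by simp,
          show (N ++ Z).length + O.length = ((N ++ Z) ++ O).length + 0 by simp; omega,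
          getE_pre, hq?]
        rfl
      rw [if_pos ⟨by omega, by rw [hval]; exact mP q hqmem⟩, hval]
      simp only [List.sum_cons, List.sum_nil, Prod.mk.injEq]
      exact ⟨by omega, by ring⟩
  rw [hr2]
  dsimp only
  by_cases hOe : O = []
  · have hO0 : O.length = 0 := by rw [hOe]; rfl
    rw [if_neg (by omega)]
    rw [hO0]
    push_cast
    ring
  · have hOpos : 0 < O.length := List.length_pos_iff.mpr hOe
    rw [if_pos (by omega)]
    push_cast
    ring

-- ===== VERDICT (by name: the statement is the Claim_ definition above) =====
theorem solve_optimum_spec : Claim_equal_solve_optimum := by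
  intro A _
  unfold Spec_solve_optimum
  rw [A_side, B_side]
  have h := neg_zero_eq
    (PySem.List.sorted (A.filter (fun a => decide (a ≤ -1))) (fun x => x) false)
    (A.filter (fun a => decide (a = 0)))
    (fun x hx => by simpa using (List.mem_filter.mp hx).2)
  have hones : (A.filter (fun a => decide (a = 1))).sum
      = ((A.filter (fun a => decide (a = 1))).length : Int) :=
    ones_sum _ (fun x hx => by simpa using (List.mem_filter.mp hx).2)
  rw [hones]
  linarith [h]
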